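-- pv_equiv track=rewrite | github.com/zachbintech/image-checker-suite-demo | similar/similar_core.py | group_images_by_hash
-- ===== SOURCE A (Python) =====
-- def group_images_by_hash(hashes, threshold=5):
--     """
--     Group images based on perceptual hash differences.
--
--     Args:
--         hashes (dict): Mapping from image paths/names to phashes.
--         threshold (int): Maximum Hamming distance to group images.
--
--     Returns:
--         list: Groups of similar images based on hashing.
--     """
--     groups = []
--     visited = set()
--
--     for image1, hash1 in hashes.items():
--         if image1 in visited:
--             continue
--         group = [image1]
--         visited.add(image1)
--         for image2, hash2 in hashes.items():
--             if image2 in visited: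
--                 continue
--             if abs(hash1 - hash2) <= threshold:
--                 group.append(image2)
--                 visited.add(image2)
--         groups.append(group)
--
--     return groups
-- ===== SOURCE B (Python) =====
-- def group_images_by_hash(hashes, threshold=5):
--     """Single pass: each image joins the first existing group whose seed hash
--     is within threshold, else it seeds a new group."""
--     groups = []  # each entry: [seed_hash, members]
--     for image, h in hashes.items():
--         for g in groups:
--             if abs(g[0] - h) <= threshold:
--                 g[1].append(image)
--                 break
--         else:
--             groups.append([h, [image]])
--     return [g[1] for g in groups]
-- ===== Notes on version B (the rewrite author's own statement) =====
-- stated objective: simpler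
-- what changed: Replaces A's nested rescans of the whole dict with a visited set by a single online pass in which each image joins the first group whose seed hash is within threshold (or seeds a new group); no visited set, no second traversal.
import Mathlib
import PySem

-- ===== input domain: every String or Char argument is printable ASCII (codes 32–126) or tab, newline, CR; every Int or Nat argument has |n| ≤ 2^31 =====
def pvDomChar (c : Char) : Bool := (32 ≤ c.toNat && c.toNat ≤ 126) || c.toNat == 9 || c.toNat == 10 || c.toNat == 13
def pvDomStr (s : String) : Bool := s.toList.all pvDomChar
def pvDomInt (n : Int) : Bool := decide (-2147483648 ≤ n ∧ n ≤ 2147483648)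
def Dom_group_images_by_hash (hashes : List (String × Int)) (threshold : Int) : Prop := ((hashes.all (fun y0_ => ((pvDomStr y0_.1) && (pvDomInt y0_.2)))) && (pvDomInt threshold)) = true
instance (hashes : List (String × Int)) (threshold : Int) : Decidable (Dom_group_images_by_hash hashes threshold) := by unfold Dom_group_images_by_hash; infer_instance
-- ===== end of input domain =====

-- B replaces A's nested rescans with a visited set by a single online pass over a list
-- of group seeds (objective: simpler); return value only.

-- ===== PORT A =====
-- body of A's inner 'for image2, hash2 in hashes.items()' loop
def pvStepInner (threshold hash1 : Int) (st : List String × PySem.Set String)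
    (q : String × Int) : List String × PySem.Set String :=
  if PySem.Set.contains st.2 q.1 then st
  else if |hash1 - q.2| ≤ threshold then (st.1 ++ [q.1], PySem.Set.add st.2 q.1)
  else st

-- body of A's outer 'for image1, hash1 in hashes.items()' loop
def pvStepOuter (threshold : Int) (hashes : List (String × Int))
    (st : List (List String) × PySem.Set String) (p : String × Int) :
    List (List String) × PySem.Set String :=
  if PySem.Set.contains st.2 p.1 then st
  else
    let r := hashes.foldl (pvStepInner threshold p.2) ([p.1], PySem.Set.add st.2 p.1)
    (st.1 ++ [r.1], r.2)

def group_images_by_hash (hashes : List (String × Int)) (threshold : Int) : List (List String) :=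
  (hashes.foldl (pvStepOuter threshold hashes) ([], PySem.Set.empty)).1

-- ===== PORT B =====
-- B's inner 'for g in groups: … break / else: append' scan over the seed list
def pvJoinFirst (threshold : Int) (gs : List (Int × List String)) (image : String) (h : Int) :
    List (Int × List String) :=
  match gs with
  | [] => [(h, [image])]
  | (s, mem) :: rest =>
    if |s - h| ≤ threshold then (s, mem ++ [image]) :: rest
    else (s, mem) :: pvJoinFirst threshold rest image h

def group_images_by_hash_alt (hashes : List (String × Int)) (threshold : Int) : List (List String) :=
  (hashes.foldl (fun gs p => pvJoinFirst threshold gs p.1 p.2) []).map Prod.snd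

-- ===== PRECONDITION & SPEC =====
-- Pre_ excludes association lists with duplicate keys: a Python dict argument cannot
-- contain them, so the list model's behaviour there corresponds to no run of the Python.
def Pre_group_images_by_hash (hashes : List (String × Int)) (threshold : Int) : Prop :=
  (hashes.map Prod.fst).Nodup
instance (hashes : List (String × Int)) (threshold : Int) : Decidable (Pre_group_images_by_hash hashes threshold) := by unfold Pre_group_images_by_hash; infer_instance
def pvWitness_group_images_by_hash : (List (String × Int)) × Int := ([("a", 3), ("b", 10), ("c", 4)], 5)

def Spec_group_images_by_hash (hashes : List (String × Int)) (threshold : Int) (out : List (List String)) : Prop := out = group_images_by_hash_alt hashes threshold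
instance (hashes : List (String × Int)) (threshold : Int) (out : List (List String)) : Decidable (Spec_group_images_by_hash hashes threshold out) := by unfold Spec_group_images_by_hash; infer_instance

-- ===== CLAIM (what is proved, stated in full; the proofs are below) =====
def Claim_equal_group_images_by_hash : Prop := ∀ (hashes : List (String × Int)) (threshold : Int), Dom_group_images_by_hash hashes threshold → Pre_group_images_by_hash hashes threshold → Spec_group_images_by_hash hashes threshold (group_images_by_hash hashes threshold)

-- ===== LEMMAS AND PROOFS =====

-- common reference form: greedy grouping by first-fitting seed, structurally recursive
def pvSpecG (t : Int) : List (String × Int) → List (List String)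
  | [] => []
  | p :: rest =>
    (p.1 :: (rest.filter (fun q => decide (|p.2 - q.2| ≤ t))).map Prod.fst)
      :: pvSpecG t (rest.filter (fun q => !decide (|p.2 - q.2| ≤ t)))
termination_by l => l.length
decreasing_by
  rw [List.length_unattach]
  exact Nat.lt_succ_of_le (le_trans (List.length_filter_le _ _) (le_of_eq List.length_attach))

theorem pvB_foldl_cons (t : Int) (l : List (String × Int)) :
    ∀ (s : Int) (m : List String) (gs : List (Int × List String)),
    l.foldl (fun gs p => pvJoinFirst t gs p.1 p.2) ((s, m) :: gs)
      = (s, m ++ (l.filter (fun q => decide (|s - q.2| ≤ t))).map Prod.fst)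
        :: (l.filter (fun q => !decide (|s - q.2| ≤ t))).foldl
             (fun gs p => pvJoinFirst t gs p.1 p.2) gs := by
  induction l with
  | nil => intro s m gs; simp
  | cons p l ih =>
    intro s m gs
    by_cases hw : |s - p.2| ≤ t
    · simp [List.foldl_cons, pvJoinFirst, hw, ih]
    · simp [List.foldl_cons, pvJoinFirst, hw, ih]

theorem pvB_eq_spec (t : Int) : ∀ (n : Nat) (l : List (String × Int)), l.length ≤ n →
    ((l.foldl (fun gs p => pvJoinFirst t gs p.1 p.2) []).map Prod.snd) = pvSpecG t l := by
  intro n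
  induction n with
  | zero =>
    intro l hl
    have : l = [] := List.eq_nil_of_length_eq_zero (Nat.le_zero.mp hl)
    subst this; simp [pvSpecG]
  | succ n ih =>
    intro l hl
    match l with
    | [] => simp [pvSpecG]
    | p :: l' =>
      have h1 : (l'.foldl (fun gs p => pvJoinFirst t gs p.1 p.2) [(p.2, [p.1])]).map Prod.snd
          = (([p.1] ++ (l'.filter (fun q => decide (|p.2 - q.2| ≤ t))).map Prod.fst)
             :: ((l'.filter (fun q => !decide (|p.2 - q.2| ≤ t))).foldl
                  (fun gs p => pvJoinFirst t gs p.1 p.2) []).map Prod.snd) := by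
        rw [pvB_foldl_cons]; rfl
      have hlen : (l'.filter (fun q => !decide (|p.2 - q.2| ≤ t))).length ≤ n := by
        have := List.length_filter_le (fun q => !decide (|p.2 - q.2| ≤ t)) l'
        simp at hl; omega
      calc ((p :: l').foldl (fun gs p => pvJoinFirst t gs p.1 p.2) []).map Prod.snd
          = (l'.foldl (fun gs p => pvJoinFirst t gs p.1 p.2) [(p.2, [p.1])]).map Prod.snd := rfl
        _ = _ := h1
        _ = pvSpecG t (p :: l') := by
            rw [ih _ hlen]; simp [pvSpecG]

theorem pvA_inner_char (t h : Int) : ∀ (L : List (String × Int)) (g : List String) (V : PySem.Set String),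
    (L.map Prod.fst).Nodup →
    L.foldl (pvStepInner t h) (g, V)
      = (g ++ (L.filter (fun q => !(PySem.Set.contains V q.1) && decide (|h - q.2| ≤ t))).map Prod.fst,
         V ++ (L.filter (fun q => !(PySem.Set.contains V q.1) && decide (|h - q.2| ≤ t))).map Prod.fst) := by
  intro L
  induction L with
  | nil => intro g V _; simp
  | cons q L ih =>
    intro g V hnd
    rw [List.map_cons] at hnd
    rcases List.nodup_cons.mp hnd with ⟨hqk, hnd'⟩
    by_cases hc : PySem.Set.contains V q.1 = true
    · have hmemV : q.1 ∈ V := (PySem.Set.contains_iff V q.1).mp hc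
      have hstep : pvStepInner t h (g, V) q = (g, V) := by simp [pvStepInner, hmemV]
      have hfil : (q :: L).filter (fun r => !(PySem.Set.contains V r.1) && decide (|h - r.2| ≤ t))
          = L.filter (fun r => !(PySem.Set.contains V r.1) && decide (|h - r.2| ≤ t)) := by
        simp [hmemV]
      rw [List.foldl_cons, hstep, hfil, ih g V hnd']
    · have hcb : PySem.Set.contains V q.1 = false := by simpa using hc
      have hmem : q.1 ∉ V := fun hm => hc ((PySem.Set.contains_iff V q.1).mpr hm)
      by_cases hw : |h - q.2| ≤ t
      · have hadd : PySem.Set.add V q.1 = V ++ [q.1] := PySem.Set.add_of_not_mem hmem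
        have hstep : pvStepInner t h (g, V) q = (g ++ [q.1], V ++ [q.1]) := by
          simp [pvStepInner, hw, hmem]
        rw [List.foldl_cons, hstep, ih (g ++ [q.1]) (V ++ [q.1]) hnd']
        have hfeq : L.filter (fun r => !(PySem.Set.contains (V ++ [q.1]) r.1) && decide (|h - r.2| ≤ t))
            = L.filter (fun r => !(PySem.Set.contains V r.1) && decide (|h - r.2| ≤ t)) := by
          apply List.filter_congr
          intro r hr
          have hne : r.1 ≠ q.1 := fun he => hqk (he ▸ List.mem_map_of_mem hr)
          simp [PySem.Set.contains_eq_listContains, hne]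
        have hfil : (q :: L).filter (fun r => !(PySem.Set.contains V r.1) && decide (|h - r.2| ≤ t))
            = q :: L.filter (fun r => !(PySem.Set.contains V r.1) && decide (|h - r.2| ≤ t)) := by
          simp [hmem, hw]
        rw [hfeq, hfil]
        simp
      · have hstep : pvStepInner t h (g, V) q = (g, V) := by
          simp [pvStepInner, hw, hmem]
        have hfil : (q :: L).filter (fun r => !(PySem.Set.contains V r.1) && decide (|h - r.2| ≤ t))
            = L.filter (fun r => !(PySem.Set.contains V r.1) && decide (|h - r.2| ≤ t)) := by
          simp [hw]
        rw [List.foldl_cons, hstep, hfil, ih g V hnd']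

theorem pvA_outer_char (t : Int) (hashes : List (String × Int))
    (hnd : (hashes.map Prod.fst).Nodup) :
    ∀ (l : List (String × Int)), ∀ (G : List (List String)) (V : PySem.Set String),
    l.Sublist hashes →
    hashes.filter (fun p => !(PySem.Set.contains V p.1))
      = l.filter (fun p => !(PySem.Set.contains V p.1)) →
    (l.foldl (pvStepOuter t hashes) (G, V)).1
      = G ++ pvSpecG t (l.filter (fun p => !(PySem.Set.contains V p.1))) := by
  intro l
  induction l with
  | nil => intro G V _ hfil; simp [pvSpecG]
  | cons p l' ih =>
    intro G V hsub hfil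
    have hsub' : l'.Sublist hashes := ((List.sublist_cons_self p l').trans hsub)
    have hlnd : ((p :: l').map Prod.fst).Nodup := (hsub.map Prod.fst).nodup hnd
    rw [List.map_cons] at hlnd
    rcases List.nodup_cons.mp hlnd with ⟨hpk, hl'nd⟩
    by_cases hc : PySem.Set.contains V p.1 = true
    · -- p is already visited: skipped by A and dropped by the filter
      have hmemV : p.1 ∈ V := (PySem.Set.contains_iff V p.1).mp hc
      have hstep : pvStepOuter t hashes (G, V) p = (G, V) := by simp [pvStepOuter, hmemV]
      have hdrop : (p :: l').filter (fun q => !(PySem.Set.contains V q.1))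
          = l'.filter (fun q => !(PySem.Set.contains V q.1)) := by
        simp [hmemV]
      rw [List.foldl_cons, hstep, hdrop]
      exact ih G V hsub' (by rw [hfil, hdrop])
    · have hcb : PySem.Set.contains V p.1 = false := by simpa using hc
      have hpV : p.1 ∉ V := fun hm => hc ((PySem.Set.contains_iff V p.1).mpr hm)
      have hadd : PySem.Set.add V p.1 = V ++ [p.1] := PySem.Set.add_of_not_mem hpV
      have e1 : hashes.filter (fun q => !(PySem.Set.contains V q.1))
          = p :: l'.filter (fun q => !(PySem.Set.contains V q.1)) := by
        rw [hfil]; simp [hpV]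
      -- the inner scan collects exactly the still-unvisited items within threshold of p.2
      have hinner := pvA_inner_char t p.2 hashes [p.1] (V ++ [p.1]) hnd
      -- identify that filter over hashes with a filter over l'
      have hMeq : hashes.filter (fun q => !(PySem.Set.contains (V ++ [p.1]) q.1) && decide (|p.2 - q.2| ≤ t))
          = (l'.filter (fun q => !(PySem.Set.contains V q.1))).filter (fun q => decide (|p.2 - q.2| ≤ t)) := by
        have step1 : hashes.filter (fun q => !(PySem.Set.contains (V ++ [p.1]) q.1) && decide (|p.2 - q.2| ≤ t))
            = (hashes.filter (fun q => !(PySem.Set.contains V q.1))).filter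
                (fun q => !(q.1 == p.1) && decide (|p.2 - q.2| ≤ t)) := by
          rw [List.filter_filter]
          apply List.filter_congr
          intro q _
          simp only [PySem.Set.contains_eq_listContains, List.contains_append, List.contains_cons,
            List.contains_nil, Bool.or_false, Bool.not_or]
          cases hV : List.contains V q.1 <;> cases hqp : (q.1 == p.1) <;>
            cases hw : decide (|p.2 - q.2| ≤ t) <;> simp
        rw [step1, e1]
        have hphead : ((p.1 == p.1) : Bool) = true := by simp
        simp only [List.filter_cons, hphead, Bool.not_true, Bool.false_and, Bool.false_eq_true,
          if_false]
        simp only [List.filter_filter]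
        apply List.filter_congr
        intro q hq
        have hne : (q.1 == p.1) = false := by
          simp only [beq_eq_false_iff_ne, ne_eq]
          exact fun he => hpk (he ▸ List.mem_map_of_mem hq)
        simp [hne]
      have hstep : pvStepOuter t hashes (G, V) p
          = (G ++ [p.1 :: ((l'.filter (fun q => !(PySem.Set.contains V q.1))).filter
                (fun q => decide (|p.2 - q.2| ≤ t))).map Prod.fst],
             (V ++ [p.1]) ++ ((l'.filter (fun q => !(PySem.Set.contains V q.1))).filter
                (fun q => decide (|p.2 - q.2| ≤ t))).map Prod.fst) := by
        simp only [pvStepOuter, hcb, Bool.false_eq_true, if_false, hadd]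
        rw [hinner, hMeq]
        simp
      -- key fact: a key of l' is among the freshly collected keys iff it is unvisited and within threshold
      have hMk : ∀ q ∈ l',
          ((PySem.Set.contains (((l'.filter (fun q => !(PySem.Set.contains V q.1))).filter
              (fun q => decide (|p.2 - q.2| ≤ t))).map Prod.fst) q.1) : Bool)
            = (!(PySem.Set.contains V q.1) && decide (|p.2 - q.2| ≤ t)) := by
        intro q hq'
        by_cases hin : q.1 ∈ ((l'.filter (fun q => !(PySem.Set.contains V q.1))).filter
            (fun q => decide (|p.2 - q.2| ≤ t))).map Prod.fst
        · rcases List.mem_map.mp hin with ⟨r, hr, hre⟩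
          have hr1 : r ∈ l' := List.mem_of_mem_filter (List.mem_of_mem_filter hr)
          have hrq : r = q := List.inj_on_of_nodup_map hl'nd hr1 hq' hre
          subst hrq
          have h1 : decide (|p.2 - r.2| ≤ t) = true := (List.mem_filter.mp hr).2
          have h2 : (!(PySem.Set.contains V r.1) : Bool) = true :=
            (List.mem_filter.mp (List.mem_of_mem_filter hr)).2
          rw [(PySem.Set.contains_iff _ _).mpr hin, h1, h2]
          rfl
        · have hl : (PySem.Set.contains (((l'.filter (fun q => !(PySem.Set.contains V q.1))).filter
              (fun q => decide (|p.2 - q.2| ≤ t))).map Prod.fst) q.1 : Bool) = false :=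
            Bool.eq_false_iff.mpr (fun h => hin ((PySem.Set.contains_iff _ _).mp h))
          rw [hl]
          cases hV : (PySem.Set.contains V q.1 : Bool)
          · cases hw2 : decide (|p.2 - q.2| ≤ t)
            · rfl
            · exfalso
              apply hin
              have hqf : q ∈ l'.filter (fun q => !(PySem.Set.contains V q.1)) :=
                List.mem_filter.mpr ⟨hq', by rw [hV]; rfl⟩
              exact List.mem_map_of_mem (List.mem_filter.mpr ⟨hqf, hw2⟩)
          · rfl
      -- contains of the new visited set, on elements of l'
      have hV2 : ∀ q ∈ l',
          ((PySem.Set.contains ((V ++ [p.1]) ++ ((l'.filter (fun q => !(PySem.Set.contains V q.1))).filter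
              (fun q => decide (|p.2 - q.2| ≤ t))).map Prod.fst) q.1) : Bool)
            = ((PySem.Set.contains V q.1) || (!(PySem.Set.contains V q.1) && decide (|p.2 - q.2| ≤ t))) := by
        intro q hq'
        have hne : (q.1 == p.1) = false := by
          simp only [beq_eq_false_iff_ne, ne_eq]
          exact fun he => hpk (he ▸ List.mem_map_of_mem hq')
        rw [PySem.Set.contains_eq_listContains, List.contains_append, List.contains_append]
        have h1 : List.contains [p.1] q.1 = false := by
          rw [List.contains_cons, hne]; rfl
        rw [h1]
        rw [← PySem.Set.contains_eq_listContains, ← PySem.Set.contains_eq_listContains, hMk q hq']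
        cases hV : (PySem.Set.contains V q.1 : Bool) <;> rfl
      -- the filter for the new visited set coincides over hashes and over l'
      have hsplit : ∀ (L : List (String × Int)), (∀ q ∈ L, q ∈ l') →
          L.filter (fun q => !(PySem.Set.contains ((V ++ [p.1]) ++ ((l'.filter (fun q => !(PySem.Set.contains V q.1))).filter
              (fun q => decide (|p.2 - q.2| ≤ t))).map Prod.fst) q.1))
          = (L.filter (fun q => !(PySem.Set.contains V q.1))).filter (fun q => !decide (|p.2 - q.2| ≤ t)) := by
        intro L hLsub
        conv_rhs => rw [List.filter_filter]
        apply List.filter_congr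
        intro q hqL
        have hq' : q ∈ l' := hLsub q hqL
        rw [hV2 q hq']
        cases hV : (PySem.Set.contains V q.1 : Bool) <;>
          cases hw2 : decide (|p.2 - q.2| ≤ t) <;> rfl
      have hfil2 : hashes.filter (fun q => !(PySem.Set.contains ((V ++ [p.1]) ++ ((l'.filter (fun q => !(PySem.Set.contains V q.1))).filter
              (fun q => decide (|p.2 - q.2| ≤ t))).map Prod.fst) q.1))
          = l'.filter (fun q => !(PySem.Set.contains ((V ++ [p.1]) ++ ((l'.filter (fun q => !(PySem.Set.contains V q.1))).filter
              (fun q => decide (|p.2 - q.2| ≤ t))).map Prod.fst) q.1)) := by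
        have lhs : hashes.filter (fun q => !(PySem.Set.contains ((V ++ [p.1]) ++ ((l'.filter (fun q => !(PySem.Set.contains V q.1))).filter
              (fun q => decide (|p.2 - q.2| ≤ t))).map Prod.fst) q.1))
            = (hashes.filter (fun q => !(PySem.Set.contains V q.1))).filter
                (fun q => !(q.1 == p.1) && !(PySem.Set.contains (((l'.filter (fun q => !(PySem.Set.contains V q.1))).filter
                  (fun q => decide (|p.2 - q.2| ≤ t))).map Prod.fst) q.1)) := by
          conv_rhs => rw [List.filter_filter]
          apply List.filter_congr
          intro q _
          simp only [PySem.Set.contains_eq_listContains, List.contains_append, List.contains_cons,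
            List.contains_nil, Bool.or_false, Bool.not_or]
          cases hV : List.contains V q.1 <;> cases hqp : (q.1 == p.1) <;> ac_rfl
        rw [lhs, e1]
        have hphead : ((p.1 == p.1) : Bool) = true := by simp
        simp only [List.filter_cons, hphead, Bool.not_true, Bool.false_and, Bool.false_eq_true,
          if_false]
        rw [hsplit l' (fun q hq => hq)]
        apply List.filter_congr
        intro q hq
        have hq' : q ∈ l' := List.mem_of_mem_filter hq
        have hne : (q.1 == p.1) = false := by
          simp only [beq_eq_false_iff_ne, ne_eq]
          exact fun he => hpk (he ▸ List.mem_map_of_mem hq')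
        have hqVb : (PySem.Set.contains V q.1 : Bool) = false := by
          have := (List.mem_filter.mp hq).2
          cases h : (PySem.Set.contains V q.1 : Bool)
          · rfl
          · rw [h] at this; exact absurd this (by simp)
        rw [hMk q hq', hne, hqVb]
        cases hw2 : decide (|p.2 - q.2| ≤ t) <;> rfl
      -- assemble
      rw [List.foldl_cons, hstep]
      rw [ih _ _ hsub' hfil2]
      rw [hsplit l' (fun q hq => hq)]
      have hspec : pvSpecG t ((p :: l').filter (fun q => !(PySem.Set.contains V q.1)))
          = (p.1 :: ((l'.filter (fun q => !(PySem.Set.contains V q.1))).filter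
                (fun q => decide (|p.2 - q.2| ≤ t))).map Prod.fst)
            :: pvSpecG t ((l'.filter (fun q => !(PySem.Set.contains V q.1))).filter
                (fun q => !decide (|p.2 - q.2| ≤ t))) := by
        have : (p :: l').filter (fun q => !(PySem.Set.contains V q.1))
            = p :: l'.filter (fun q => !(PySem.Set.contains V q.1)) := by
          simp [hpV]
        rw [this]
        simp [pvSpecG, List.filter_filter]
      rw [hspec]
      simp

-- ===== VERDICT (by name: the statement is the Claim_ definition above) =====
theorem group_images_by_hash_spec : Claim_equal_group_images_by_hash := by
  intro hashes threshold _ hpre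
  unfold Spec_group_images_by_hash
  unfold group_images_by_hash group_images_by_hash_alt
  have hb := pvB_eq_spec threshold hashes.length hashes (le_refl _)
  rw [hb]
  have ha := pvA_outer_char threshold hashes hpre hashes [] []
    (List.Sublist.refl _) rfl
  have hfil : hashes.filter (fun p => !(PySem.Set.contains ([] : PySem.Set String) p.1)) = hashes := by
    simp [PySem.Set.contains_eq_listContains]
  rw [hfil] at ha
  simpa [PySem.Set.empty] using ha
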